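-- pv_equiv track=rewrite | github.com/guiyinan/agomTradePro | sdk/agomtradepro_mcp/audit.py | _infer_module
-- ===== SOURCE A (Python) =====
-- def _infer_module(tool_name: str) -> str:
--     """从工具名推断模块"""
--     name_lower = tool_name.lower()
--
--     module_keywords = {
--         "signal": ["signal"],
--         "policy": ["policy"],
--         "backtest": ["backtest"],
--         "regime": ["regime"],
--         "macro": ["macro"],
--         "account": ["account", "portfolio", "position", "transaction"],
--         "equity": ["equity", "stock"],
--         "fund": ["fund"],
--         "sector": ["sector"],
--         "strategy": ["strategy"],
--         "alpha": ["alpha"],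
--         "factor": ["factor"],
--         "rotation": ["rotation"],
--         "hedge": ["hedge"],
--         "realtime": ["realtime", "price"],
--         "sentiment": ["sentiment"],
--         "simulated": ["simulated", "trading"],
--         "dashboard": ["dashboard"],
--         "filter": ["filter"],
--         "event": ["event"],
--         "decision": ["decision"],
--         "task": ["task", "monitor"],
--         "ai_provider": ["ai_provider", "provider", "llm"],
--         "prompt": ["prompt"],
--     }
--
--     for module, keywords in module_keywords.items():
--         if any(kw in name_lower for kw in keywords):
--             return module
--
--     return "general"
-- ===== SOURCE B (Python) =====
-- # B: inverted algorithm — instead of scanning the keyword table and testing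
-- # substring containment per keyword, slide a window over the (lowercased) name,
-- # look every substring of keyword-size up in a precomputed keyword -> (priority,
-- # module) dict, and return the module of the lowest-priority hit.
-- _TABLE = [
--     ("signal", "signal"),
--     ("policy", "policy"),
--     ("backtest", "backtest"),
--     ("regime", "regime"),
--     ("macro", "macro"),
--     ("account", "account"),
--     ("portfolio", "account"),
--     ("position", "account"),
--     ("transaction", "account"),
--     ("equity", "equity"),
--     ("stock", "equity"),
--     ("fund", "fund"),
--     ("sector", "sector"),
--     ("strategy", "strategy"),
--     ("alpha", "alpha"),
--     ("factor", "factor"),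
--     ("rotation", "rotation"),
--     ("hedge", "hedge"),
--     ("realtime", "realtime"),
--     ("price", "realtime"),
--     ("sentiment", "sentiment"),
--     ("simulated", "simulated"),
--     ("trading", "simulated"),
--     ("dashboard", "dashboard"),
--     ("filter", "filter"),
--     ("event", "event"),
--     ("decision", "decision"),
--     ("task", "task"),
--     ("monitor", "task"),
--     ("ai_provider", "ai_provider"),
--     ("provider", "ai_provider"),
--     ("llm", "ai_provider"),
--     ("prompt", "prompt"),
-- ]
--
-- _KW_INDEX = {kw: (prio, module) for prio, (kw, module) in enumerate(_TABLE)}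
--
-- # keyword lengths range from 3 ("llm") to 11 ("ai_provider", "transaction")
--
--
-- def _infer_module(tool_name: str) -> str:
--     s = tool_name.lower()
--     n = len(s)
--     best = None
--     for i in range(n):
--         for L in range(3, 12):
--             if i + L <= n:
--                 hit = _KW_INDEX.get(s[i:i + L])
--                 if hit is not None and (best is None or hit[0] < best[0]):
--                     best = hit
--     return "general" if best is None else best[1]
-- ===== Notes on version B (the rewrite author's own statement) =====
-- stated objective: alternative
-- what changed: Inverted the control flow: instead of iterating the keyword table and testing substring containment per keyword, B slides a window over the lowercased name, looks each keyword-sized substring up in a precomputed keyword->(priority,module) dict, and returns the module of the lowest-priority hit.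
import Mathlib
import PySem

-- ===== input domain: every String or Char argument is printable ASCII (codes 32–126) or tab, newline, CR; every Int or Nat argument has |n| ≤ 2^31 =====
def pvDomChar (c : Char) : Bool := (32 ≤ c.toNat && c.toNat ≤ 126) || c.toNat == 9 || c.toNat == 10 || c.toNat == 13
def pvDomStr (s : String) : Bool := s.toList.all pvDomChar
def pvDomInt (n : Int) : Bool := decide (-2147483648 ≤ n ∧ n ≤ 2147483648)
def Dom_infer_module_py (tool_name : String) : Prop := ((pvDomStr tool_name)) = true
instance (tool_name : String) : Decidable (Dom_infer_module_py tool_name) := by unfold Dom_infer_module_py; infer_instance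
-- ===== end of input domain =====

-- B inverts A's control flow: instead of scanning the keyword table and testing substring
-- containment per keyword, it slides a window over the lowercased name, looks each
-- keyword-sized substring up in a precomputed keyword -> (priority, module) dict, and
-- returns the module of the lowest-priority hit; objective: alternative (not faster).

-- ===== PORT A =====
-- A's dict of module -> keyword list, in insertion order
def pvModuleKeywords : List (String × List String) :=
  [("signal", ["signal"]),
   ("policy", ["policy"]),
   ("backtest", ["backtest"]),
   ("regime", ["regime"]),
   ("macro", ["macro"]),
   ("account", ["account", "portfolio", "position", "transaction"]),
   ("equity", ["equity", "stock"]),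
   ("fund", ["fund"]),
   ("sector", ["sector"]),
   ("strategy", ["strategy"]),
   ("alpha", ["alpha"]),
   ("factor", ["factor"]),
   ("rotation", ["rotation"]),
   ("hedge", ["hedge"]),
   ("realtime", ["realtime", "price"]),
   ("sentiment", ["sentiment"]),
   ("simulated", ["simulated", "trading"]),
   ("dashboard", ["dashboard"]),
   ("filter", ["filter"]),
   ("event", ["event"]),
   ("decision", ["decision"]),
   ("task", ["task", "monitor"]),
   ("ai_provider", ["ai_provider", "provider", "llm"]),
   ("prompt", ["prompt"])]

-- A's loop: for module, keywords … if any(kw in name_lower for kw in keywords): return module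
def pvALoop (name_lower : String) : List (String × List String) → String
  | [] => "general"
  | (module, keywords) :: rest =>
      if keywords.any (fun kw => PySem.Str.isIn kw name_lower) then module
      else pvALoop name_lower rest

def infer_module_py (tool_name : String) : String :=
  pvALoop (PySem.Str.lower tool_name) pvModuleKeywords

-- ===== PORT B =====
-- B's flat ordered (keyword, module) table _TABLE
def pvTable : List (String × String) :=
  [("signal", "signal"), ("policy", "policy"), ("backtest", "backtest"),
   ("regime", "regime"), ("macro", "macro"),
   ("account", "account"), ("portfolio", "account"), ("position", "account"), ("transaction", "account"),
   ("equity", "equity"), ("stock", "equity"),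
   ("fund", "fund"), ("sector", "sector"), ("strategy", "strategy"),
   ("alpha", "alpha"), ("factor", "factor"), ("rotation", "rotation"), ("hedge", "hedge"),
   ("realtime", "realtime"), ("price", "realtime"),
   ("sentiment", "sentiment"),
   ("simulated", "simulated"), ("trading", "simulated"),
   ("dashboard", "dashboard"), ("filter", "filter"), ("event", "event"), ("decision", "decision"),
   ("task", "task"), ("monitor", "task"),
   ("ai_provider", "ai_provider"), ("provider", "ai_provider"), ("llm", "ai_provider"),
   ("prompt", "prompt")]

-- _KW_INDEX = {kw: (prio, module) for prio, (kw, module) in enumerate(_TABLE)}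
def pvIndex : PySem.Dict String (Int × String) :=
  PySem.Dict.ofList ((PySem.List.enumerate pvTable).map (fun p => (p.2.1, (p.1, p.2.2))))

-- 'if hit is not None and (best is None or hit[0] < best[0]): best = hit'
def pvUpd (best hit : Option (Int × String)) : Option (Int × String) :=
  match hit with
  | none => best
  | some h =>
    match best with
    | none => some h
    | some b => if h.1 < b.1 then some h else some b

-- B's inner loop: for L in range(3, 12): if i + L <= n: …  (s[i:i+L] is exact here: 0 ≤ i)
def pvInner (s : List Char) (n i : Int) (best0 : Option (Int × String)) : Option (Int × String) :=
  (PySem.List.pyRange 3 12 1).foldl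
    (fun best L =>
      if i + L ≤ n then
        pvUpd best (pvIndex.get? (String.ofList (PySem.List.slice s (some i) (some (i + L)))))
      else best) best0

def infer_module_py_alt (tool_name : String) : String :=
  let s := (PySem.Str.lower tool_name).toList
  let n : Int := s.length
  match (PySem.List.pyRange 0 n 1).foldl (fun best i => pvInner s n i best) none with
  | none => "general"
  | some b => b.2

-- ===== PRECONDITION & SPEC =====
def Spec_infer_module_py (tool_name : String) (out : String) : Prop := out = infer_module_py_alt tool_name
instance (tool_name : String) (out : String) : Decidable (Spec_infer_module_py tool_name out) := by unfold Spec_infer_module_py; infer_instance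

-- ===== CLAIM (what is proved, stated in full; the proofs are below) =====
def Claim_equal_infer_module_py : Prop := ∀ (tool_name : String), Dom_infer_module_py tool_name → Spec_infer_module_py tool_name (infer_module_py tool_name)

-- ===== LEMMAS AND PROOFS =====

-- proof-side: first-match scan over a flat (keyword, module) table
def pvScan (nl : String) : List (String × String) → String
  | [] => "general"
  | (kw, module) :: rest =>
      if PySem.Str.isIn kw nl then module else pvScan nl rest

-- scanning one module's block of the flattened table equals A's any() test for that module
theorem pvScan_block (nl m : String) (kws : List String) (rest : List (String × String)) :
    pvScan nl (kws.map (fun kw => (kw, m)) ++ rest)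
      = if kws.any (fun kw => PySem.Str.isIn kw nl) then m else pvScan nl rest := by
  induction kws with
  | nil => simp
  | cons k t ih =>
      by_cases h : PySem.Chars.isIn k.toList nl.toList = true <;>
        simp [pvScan, ih, h]

-- A's nested loop equals the first-match scan over the flattened table
theorem pvALoop_eq (nl : String) (ms : List (String × List String)) :
    pvALoop nl ms = pvScan nl (ms.flatMap (fun p => p.2.map (fun kw => (kw, p.1)))) := by
  induction ms with
  | nil => rfl
  | cons p rest ih =>
      obtain ⟨m, kws⟩ := p
      simp only [pvALoop, List.flatMap_cons, pvScan_block, ih]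

theorem pvTable_eq :
    pvTable = pvModuleKeywords.flatMap (fun p => p.2.map (fun kw => (kw, p.1))) := by
  rfl

-- first-match scan as List.find?
theorem pvScan_eq_find (nl : String) (tbl : List (String × String)) :
    pvScan nl tbl =
      match tbl.find? (fun p => PySem.Chars.isIn p.1.toList nl.toList) with
      | some p => p.2
      | none => "general" := by
  induction tbl with
  | nil => rfl
  | cons p rest ih =>
      obtain ⟨kw, m⟩ := p
      by_cases h : PySem.Chars.isIn kw.toList nl.toList = true <;>
        simp [pvScan, List.find?, h, ih]

-- ---- B side ----

-- the index's association list, with explicit running priority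
def pvIdxList : List (String × String) → Int → List (String × (Int × String))
  | [], _ => []
  | (kw, m) :: rest, j => (kw, (j, m)) :: pvIdxList rest (j + 1)

-- dict lookup on an association list
def pvLook (items : List (String × (Int × String))) (w : String) : Option (Int × String) :=
  (items.find? (fun p => p.1 == w)).map (·.2)

theorem pvIndex_items : pvIndex.items = pvIdxList pvTable 0 := by decide

theorem pvGet_eq_look (w : String) : pvIndex.get? w = pvLook (pvIdxList pvTable 0) w := by
  show (pvIndex.items.find? (fun p => p.1 == w)).map (·.2) = _
  rw [pvIndex_items]; rfl

theorem pvLook_cons (kw : String) (jm : Int × String) (its : List (String × (Int × String)))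
    (w : String) :
    pvLook ((kw, jm) :: its) w = if kw = w then some jm else pvLook its w := by
  by_cases h : kw = w
  · simp [pvLook, List.find?, h]
  · have hb : (kw == w) = false := beq_eq_false_iff_ne.mpr h
    simp [pvLook, List.find?, hb, h]

theorem pvLook_ge (T : List (String × String)) (j0 : Int) (w : String) (x : Int × String)
    (h : pvLook (pvIdxList T j0) w = some x) : j0 ≤ x.1 := by
  induction T generalizing j0 with
  | nil => simp [pvLook, pvIdxList] at h
  | cons p rest ih =>
      obtain ⟨kw, m⟩ := p
      rw [pvIdxList, pvLook_cons] at h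
      split at h
      · cases h; simp
      · have := ih (j0 + 1) h; omega

-- the window strings B inspects at position i
def pvWins (s : List Char) (i : Int) : List String :=
  ((PySem.List.pyRange 3 12 1).filter (fun L => i + L ≤ (s.length : Int))).map
    (fun L => String.ofList (PySem.List.slice s (some i) (some (i + L))))

-- all lookup results, in scan order
def pvHits (s : List Char) (items : List (String × (Int × String))) :
    List (Option (Int × String)) :=
  (PySem.List.pyRange 0 (s.length : Int) 1).flatMap (fun i => (pvWins s i).map (pvLook items))

-- the guarded inner fold is a pvUpd-fold over the looked-up windows
theorem pvFold_guard (c : Int → Bool) (f : Int → Option (Int × String))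
    (Ls : List Int) (b : Option (Int × String)) :
    Ls.foldl (fun b L => if c L then pvUpd b (f L) else b) b
      = ((Ls.filter c).map f).foldl pvUpd b := by
  induction Ls generalizing b with
  | nil => rfl
  | cons L t ih =>
      by_cases h : c L = true <;> simp [List.filter, h, ih]

theorem pvInner_eq (s : List Char) (i : Int) (b : Option (Int × String)) :
    pvInner s (s.length : Int) i b
      = ((pvWins s i).map (pvLook (pvIdxList pvTable 0))).foldl pvUpd b := by
  unfold pvInner pvWins
  rw [show (fun (best : Option (Int × String)) (L : Int) =>
        if i + L ≤ (s.length : Int) then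
          pvUpd best (pvIndex.get? (String.ofList (PySem.List.slice s (some i) (some (i + L)))))
        else best)
      = (fun best L =>
        if (fun L => decide (i + L ≤ (s.length : Int))) L = true then
          pvUpd best ((fun L => pvIndex.get? (String.ofList (PySem.List.slice s (some i) (some (i + L))))) L)
        else best) from by funext b L; simp]
  rw [pvFold_guard]
  simp [List.map_map, Function.comp_def, pvGet_eq_look]

theorem pvFold_flat (Is : List Int) (h : Int → List (Option (Int × String)))
    (b : Option (Int × String)) :
    Is.foldl (fun b i => (h i).foldl pvUpd b) b = (Is.flatMap h).foldl pvUpd b := by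
  induction Is generalizing b with
  | nil => rfl
  | cons i t ih => simp [List.flatMap_cons, List.foldl_append, ih]

-- pvUpd-fold over a list of nones is the identity
theorem pvFold_none (vs : List (Option (Int × String))) (b : Option (Int × String))
    (H : ∀ v ∈ vs, v = none) : vs.foldl pvUpd b = b := by
  induction vs generalizing b with
  | nil => rfl
  | cons v t ih =>
      have hv := H v (List.mem_cons_self ..)
      subst hv
      exact ih b (fun v hv => H v (List.mem_cons_of_mem _ hv))

-- pvUpd-fold returns the unique minimal-priority hit
theorem pvFold_min_aux (r : Int × String) (vs : List (Option (Int × String)))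
    (b : Option (Int × String))
    (Hmin : ∀ x, some x ∈ vs → r.1 ≤ x.1 ∧ (x.1 ≤ r.1 → x = r))
    (Hb : b = some r ∨ (some r ∈ vs ∧ (b = none ∨ ∃ y, b = some y ∧ r.1 < y.1))) :
    vs.foldl pvUpd b = some r := by
  induction vs generalizing b with
  | nil =>
      rcases Hb with h | ⟨h, _⟩
      · simpa using h
      · simp at h
  | cons v t ih =>
      have Hmin' : ∀ x, some x ∈ t → r.1 ≤ x.1 ∧ (x.1 ≤ r.1 → x = r) :=
        fun x hx => Hmin x (List.mem_cons_of_mem _ hx)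
      rw [List.foldl_cons]
      rcases Hb with hb | ⟨hmem, hb⟩
      · subst hb
        apply ih _ Hmin'
        left
        cases v with
        | none => rfl
        | some x =>
            have hx := Hmin x (List.mem_cons_self ..)
            simp [pvUpd]
            omega
      · cases v with
        | none =>
            apply ih b Hmin'
            right
            refine ⟨?_, hb⟩
            rcases List.mem_cons.mp hmem with h | h
            · exact absurd h (by simp)
            · exact h
        | some x =>
            by_cases hxr : x = r
            · subst hxr
              apply ih _ Hmin'
              left
              rcases hb with hb | ⟨y, hb, hy⟩ <;> subst hb <;> simp [pvUpd]
              omega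
            · have hx := Hmin x (List.mem_cons_self ..)
              have hrx : r.1 < x.1 := by
                rcases hx with ⟨h1, h2⟩
                rcases lt_or_ge r.1 x.1 with h | h
                · exact h
                · exact absurd (h2 h) hxr
              have hmem' : some r ∈ t := by
                rcases List.mem_cons.mp hmem with h | h
                · exact absurd (Option.some.inj h).symm hxr
                · exact h
              apply ih _ Hmin'
              right
              refine ⟨hmem', ?_⟩
              rcases hb with hb | ⟨y, hb, hy⟩ <;> subst hb
              · right; exact ⟨x, by simp [pvUpd], hrx⟩
              · right
                simp only [pvUpd]
                split
                · exact ⟨x, rfl, hrx⟩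
                · exact ⟨y, rfl, hy⟩

theorem pvFold_min (r : Int × String) (vs : List (Option (Int × String)))
    (Hmem : some r ∈ vs)
    (Hmin : ∀ x, some x ∈ vs → r.1 ≤ x.1 ∧ (x.1 ≤ r.1 → x = r)) :
    vs.foldl pvUpd none = some r :=
  pvFold_min_aux r vs none Hmin (Or.inr ⟨Hmem, Or.inl rfl⟩)

-- a window of s is determined by an in-range (i, L); its char list is a take of a drop
theorem pvWins_mem (s : List Char) (i : Int) (w : String) (hw : w ∈ pvWins s i)
    (hi : 0 ≤ i) :
    ∃ L : Int, 3 ≤ L ∧ L < 12 ∧ i + L ≤ (s.length : Int) ∧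
      w.toList = (s.drop i.toNat).take L.toNat := by
  unfold pvWins at hw
  rcases List.mem_map.mp hw with ⟨L, hL, rfl⟩
  rcases List.mem_filter.mp hL with ⟨hLr, hLc⟩
  rcases (PySem.List.mem_pyRange_one).mp hLr with ⟨hL3, hL12⟩
  refine ⟨L, hL3, hL12, by simpa using hLc, ?_⟩
  rw [PySem.List.slice_toNat s hi (by omega)]
  simp
  congr 1
  omega

-- a window that equals kw forces kw to occur in s
theorem pvWin_isIn (s : List Char) (kw : String) (i L : Int)
    (h : kw.toList = (s.drop i.toNat).take L.toNat) :
    PySem.Chars.isIn kw.toList s = true := by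
  apply (PySem.Chars.exists_prefix_drop_iff_isIn kw.toList s).mp
  exact ⟨i.toNat, h ▸ List.take_prefix _ _⟩

-- conversely, an occurrence of kw (3 ≤ |kw| ≤ 11) yields a window equal to kw
theorem pvIsIn_win (s : List Char) (kw : String)
    (hlen3 : 3 ≤ kw.toList.length) (hlen11 : kw.toList.length ≤ 11)
    (h : PySem.Chars.isIn kw.toList s = true) :
    ∃ i : Int, 0 ≤ i ∧ i < (s.length : Int) ∧ kw ∈ pvWins s i := by
  rcases (PySem.Chars.exists_prefix_drop_iff_isIn kw.toList s).mpr h with ⟨j, hp⟩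
  have hle : kw.toList.length ≤ s.length - j := by
    simpa using hp.length_le
  have hj : j + kw.toList.length ≤ s.length := by
    by_cases hjs : j ≤ s.length
    · omega
    · exfalso
      have : s.drop j = [] := List.drop_eq_nil_of_le (by omega)
      rw [this] at hp
      have := hp.length_le
      simp at this
      omega
  have htake : kw.toList = (s.drop j).take kw.toList.length :=
    List.prefix_iff_eq_take.mp hp
  refine ⟨(j : Int), by omega, by exact_mod_cast (by omega : j < s.length), ?_⟩
  unfold pvWins
  apply List.mem_map.mpr
  refine ⟨(kw.toList.length : Int), List.mem_filter.mpr ⟨?_, ?_⟩, ?_⟩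
  · exact (PySem.List.mem_pyRange_one).mpr ⟨by exact_mod_cast hlen3, by exact_mod_cast (by omega : (kw.toList.length : Int) < 12)⟩
  · simp; exact_mod_cast (by omega : ((j : Int) + kw.toList.length) ≤ (s.length : Int))
  · rw [PySem.List.slice_toNat s (by omega) (by omega)]
    have : ((j : Int) + (kw.toList.length : Int)).toNat - ((j : Int)).toNat = kw.toList.length := by omega
    rw [this]
    have : ((j : Int)).toNat = j := by omega
    rw [this, ← htake]
    simp

-- main lemma: the min-priority fold over all window lookups is the table's first match
theorem pvMain (T : List (String × String)) (j0 : Int) (s : List Char)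
    (Hlen : ∀ p ∈ T, 3 ≤ p.1.toList.length ∧ p.1.toList.length ≤ 11) :
    ((pvHits s (pvIdxList T j0)).foldl pvUpd none).map (·.2)
      = (T.find? (fun p => PySem.Chars.isIn p.1.toList s)).map (·.2) := by
  induction T generalizing j0 with
  | nil =>
      rw [pvFold_none]
      · rfl
      · intro v hv
        unfold pvHits at hv
        rcases List.mem_flatMap.mp hv with ⟨i, _, hv⟩
        rcases List.mem_map.mp hv with ⟨w, _, rfl⟩
        simp [pvIdxList, pvLook]
  | cons p rest ih =>
      obtain ⟨kw, m⟩ := p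
      have Hlen' : ∀ p ∈ rest, 3 ≤ p.1.toList.length ∧ p.1.toList.length ≤ 11 :=
        fun p hp => Hlen p (List.mem_cons_of_mem _ hp)
      have Hkw := Hlen (kw, m) (List.mem_cons_self ..)
      by_cases h : PySem.Chars.isIn kw.toList s = true
      · -- kw occurs in s: the fold returns (j0, m)
        rw [pvFold_min (j0, m)]
        · simp [List.find?, h]
        · -- membership: some window equals kw, and its lookup is (j0, m)
          rcases pvIsIn_win s kw Hkw.1 Hkw.2 h with ⟨i, hi0, hin, hwin⟩
          unfold pvHits
          apply List.mem_flatMap.mpr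
          refine ⟨i, (PySem.List.mem_pyRange_one).mpr ⟨hi0, hin⟩, ?_⟩
          apply List.mem_map.mpr
          refine ⟨kw, hwin, ?_⟩
          rw [pvIdxList, pvLook_cons]
          simp
        · -- minimality: every hit has priority ≥ j0, and priority j0 only for (j0, m)
          intro x hx
          unfold pvHits at hx
          rcases List.mem_flatMap.mp hx with ⟨i, _, hx⟩
          rcases List.mem_map.mp hx with ⟨w, _, hlook⟩
          rw [pvIdxList, pvLook_cons] at hlook
          split at hlook
          · cases hlook
            exact ⟨le_refl _, fun _ => rfl⟩
          · have := pvLook_ge rest (j0 + 1) w x hlook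
            constructor
            · omega
            · intro hle; omega
      · -- kw does not occur: no window equals kw, so the head entry is invisible
        have hhits : pvHits s (pvIdxList ((kw, m) :: rest) j0)
            = pvHits s (pvIdxList rest (j0 + 1)) := by
          unfold pvHits
          apply List.flatMap_congr
          intro i hi
          apply List.map_congr_left
          intro w hw
          rw [pvIdxList, pvLook_cons]
          have hi0 : 0 ≤ i := ((PySem.List.mem_pyRange_one).mp hi).1
          split
          · rename_i heq
            exfalso
            rcases pvWins_mem s i w hw hi0 with ⟨L, _, _, _, hwl⟩
            exact h (pvWin_isIn s kw i L (heq ▸ hwl))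
          · rfl
        rw [hhits, ih (j0 + 1) Hlen']
        simp [List.find?, h]

-- table facts, by computation
theorem pvTable_len : ∀ p ∈ pvTable, 3 ≤ p.1.toList.length ∧ p.1.toList.length ≤ 11 := by decide

theorem pvOuter_eq (s : List Char) :
    (PySem.List.pyRange 0 (s.length : Int) 1).foldl
        (fun best i => pvInner s (s.length : Int) i best) none
      = (pvHits s (pvIdxList pvTable 0)).foldl pvUpd none := by
  unfold pvHits
  rw [← pvFold_flat]
  apply List.foldl_ext
  intro b i _
  exact pvInner_eq s i b

theorem pvAlt_eq (t : String) :
    infer_module_py_alt t =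
      match (pvHits (PySem.Str.lower t).toList (pvIdxList pvTable 0)).foldl pvUpd none with
      | none => "general"
      | some b => b.2 := by
  simp only [infer_module_py_alt]
  rw [pvOuter_eq]

-- ===== VERDICT (by name: the statement is the Claim_ definition above) =====
theorem infer_module_py_spec : Claim_equal_infer_module_py := by
  intro tool_name _
  unfold Spec_infer_module_py infer_module_py
  rw [pvALoop_eq, ← pvTable_eq, pvScan_eq_find, pvAlt_eq]
  have hmap := pvMain pvTable 0 (PySem.Str.lower tool_name).toList pvTable_len
  cases hfind : pvTable.find?
      (fun p => PySem.Chars.isIn p.1.toList (PySem.Str.lower tool_name).toList) with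
  | none =>
      rw [hfind] at hmap
      cases hF : (pvHits (PySem.Str.lower tool_name).toList (pvIdxList pvTable 0)).foldl
          pvUpd none with
      | none => rfl
      | some b => rw [hF] at hmap; simp at hmap
  | some p =>
      rw [hfind] at hmap
      cases hF : (pvHits (PySem.Str.lower tool_name).toList (pvIdxList pvTable 0)).foldl
          pvUpd none with
      | none => rw [hF] at hmap; simp at hmap
      | some b =>
          rw [hF] at hmap
          simpa using hmap.symm
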